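-- pv_equiv track=rewrite | github.com/Rhysoshea/Codewars | 5kyu/weight_for_weight.py | order_weight
-- ===== SOURCE A (Python) =====
-- def order_weight(strng):
--     arr = strng.split(' ')
--     weights = [sum([int(j) for j in i]) for i in strng.split(' ')]
--
--     map = {}
--     for i, weight in enumerate(weights):
--         if weight in map:
--             map[weight] += ' ' + arr[i]
--         else:
--             map[weight] = arr[i]
--
--     for i in map:
--         map[i] = ' '.join(sorted(map[i].split(' ')))
--
--     s = set()
--     for item in weights:
--         s.add(item)
--     s = sorted(s)
--     # print (s)
--
--     return ' '.join([map[i] for i in s])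
-- ===== SOURCE B (Python) =====
-- def order_weight(strng):
--     return ' '.join(sorted(strng.split(' '),
--                            key=lambda x: (sum(int(c) for c in x), x)))
-- ===== Notes on version B (the rewrite author's own statement) =====
-- stated objective: idiomatic
-- what changed: A groups tokens into weight-keyed dict buckets (string concatenation + re-split), sorts each bucket, and concatenates buckets along a sorted set of weights; B does one stable sort of the token list with the composite key (digit_sum, token) and joins.
import Mathlib
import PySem

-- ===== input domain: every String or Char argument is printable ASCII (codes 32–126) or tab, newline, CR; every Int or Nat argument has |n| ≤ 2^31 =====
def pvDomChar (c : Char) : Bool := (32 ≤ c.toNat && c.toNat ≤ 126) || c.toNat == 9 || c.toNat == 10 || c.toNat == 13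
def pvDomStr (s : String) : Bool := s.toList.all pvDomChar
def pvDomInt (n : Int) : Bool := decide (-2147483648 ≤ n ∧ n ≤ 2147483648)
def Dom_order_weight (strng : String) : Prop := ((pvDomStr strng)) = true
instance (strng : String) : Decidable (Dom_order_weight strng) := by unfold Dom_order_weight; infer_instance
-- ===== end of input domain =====

-- B replaces A's weight-keyed dict buckets (concatenate, re-split, per-bucket sort, merge along a
-- sorted weight set) by ONE stable sort of the token list under the composite key (digit sum, token).

-- ===== PORT A =====

-- sum([int(j) for j in i]) — int(j) raises ValueError on a non-digit char; the `.getD 0` is only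
-- reached outside Pre_order_weight, which restricts to digit/space strings.
def pvDigitSum (tok : String) : Int :=
  (tok.toList.map (fun c => (PySem.Int.ofStr? (String.ofList [c])).getD 0)).sum

def order_weight (strng : String) : String :=
  let arr := (PySem.Str.split? strng " ").getD []
  let weights := ((PySem.Str.split? strng " ").getD []).map pvDigitSum
  let m := (PySem.List.enumerate weights).foldl
    (fun d p =>
      if d.contains p.2 then
        d.insert p.2 (d.getD p.2 "" ++ " " ++ PySem.List.pyGetD arr p.1 "")
      else
        d.insert p.2 (PySem.List.pyGetD arr p.1 "")) PySem.Dict.empty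
  let m2 := m.keys.foldl
    (fun d k => d.insert k (PySem.Str.join " "
        (PySem.List.sorted ((PySem.Str.split? (d.getD k "") " ").getD []) (fun x => x)))) m
  let s := weights.foldl (fun s item => PySem.Set.add s item) PySem.Set.empty
  let s2 := PySem.List.sorted s (fun x => x)
  PySem.Str.join " " (s2.map (fun i => m2.getD i ""))

-- ===== PORT B =====
def order_weight_alt (strng : String) : String :=
  PySem.Str.join " "
    (PySem.List.sorted2 ((PySem.Str.split? strng " ").getD []) pvDigitSum (fun x => x))

-- ===== PRECONDITION & SPEC =====
-- Pre_ excludes exactly the inputs where A raises: int(j) raises ValueError on any character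
-- that is neither a space nor an ASCII digit.
def Pre_order_weight (strng : String) : Prop :=
  (strng.toList.all (fun c => c.toNat == 32 || (48 ≤ c.toNat && c.toNat ≤ 57))) = true
instance (strng : String) : Decidable (Pre_order_weight strng) := by
  unfold Pre_order_weight; infer_instance

def pvWitness_order_weight : String := "103 123 4444 99 2000"

def Spec_order_weight (strng : String) (out : String) : Prop := out = order_weight_alt strng
instance (strng : String) (out : String) : Decidable (Spec_order_weight strng out) := by unfold Spec_order_weight; infer_instance

-- ===== CLAIM (what is proved, stated in full; the proofs are below) =====
def Claim_equal_order_weight : Prop := ∀ (strng : String), Dom_order_weight strng → Pre_order_weight strng → Spec_order_weight strng (order_weight strng)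

-- ===== LEMMAS AND PROOFS =====

-- ---- proof-side abbreviations ----

/-- the lexicographic composite key of B's sort -/
def pvKey (x : String) : Lex (Int × String) := toLex (pvDigitSum x, x)

/-- the token list (Python `strng.split(' ')`). -/
def pvArr (strng : String) : List String := (PySem.Str.split? strng " ").getD []

/-- tokens of weight `w`, sorted lexicographically (one bucket of A, post second loop). -/
def pvTks (strng : String) (w : Int) : List String :=
  PySem.List.sorted ((pvArr strng).filter (fun x => pvDigitSum x == w)) (fun x => x)

/-- A's first dict loop, re-keyed on the token itself. -/
def pvStep (d : PySem.Dict Int String) (x : String) : PySem.Dict Int String :=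
  if d.contains (pvDigitSum x) then
    d.insert (pvDigitSum x) (d.getD (pvDigitSum x) "" ++ " " ++ x)
  else
    d.insert (pvDigitSum x) x

/-- string fold A uses to build a bucket value -/
def pvSJ (h : String) (t : List String) : String := t.foldl (fun a x => a ++ " " ++ x) h

/-- apply f to the head only -/
def pvMapHead (f : List Char → List Char) : List (List Char) → List (List Char)
  | [] => []
  | h :: t => f h :: t

/-- structural single-char split -/
def pvSplitCh (c : Char) : List Char → List (List Char)
  | [] => [[]]
  | x :: r =>
    match pvSplitCh c r with
    | [] => [[]]
    | h :: t => if x = c then [] :: h :: t else (x :: h) :: t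

-- ---- splitCh facts ----

lemma pvSplitCh_ne_nil (c : Char) (l : List Char) : pvSplitCh c l ≠ [] := by
  induction l with
  | nil => simp [pvSplitCh]
  | cons x r ih =>
    cases h : pvSplitCh c r with
    | nil => simp [pvSplitCh, h]
    | cons a t =>
      simp only [pvSplitCh, h]
      split <;> simp


lemma pvSplitCh_go (c : Char) : ∀ (fuel : Nat) (l cur : List Char) (acc : List (List Char)),
    l.length < fuel →
    PySem.Chars.splitOn.go [c] fuel l cur acc
      = acc.reverse ++ pvMapHead (cur.reverse ++ ·) (pvSplitCh c l) := by
  intro fuel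
  induction fuel with
  | zero => intro l cur acc h; omega
  | succ n ih =>
    intro l cur acc h
    cases l with
    | nil =>
      rw [PySem.Chars.splitOn.go.eq_def]
      simp [pvSplitCh, pvMapHead]
    | cons ch rest =>
      have hlt : rest.length < n := by
        simp only [List.length_cons] at h; omega
      by_cases hc : c = ch
      · subst hc
        have e1 : PySem.Chars.splitOn.go [c] (n + 1) (c :: rest) cur acc
            = PySem.Chars.splitOn.go [c] n rest [] (cur.reverse :: acc) := by
          rw [PySem.Chars.splitOn.go.eq_def]
          simp [List.isPrefixOf]
        rw [e1, ih rest [] _ hlt]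
        cases hs : pvSplitCh c rest with
        | nil => exact absurd hs (pvSplitCh_ne_nil c rest)
        | cons a t =>
          simp [pvSplitCh, hs, pvMapHead, List.reverse_cons, List.append_assoc]
      · have e1 : PySem.Chars.splitOn.go [c] (n + 1) (ch :: rest) cur acc
            = PySem.Chars.splitOn.go [c] n rest (ch :: cur) acc := by
          rw [PySem.Chars.splitOn.go.eq_def]
          have hp : [c].isPrefixOf (ch :: rest) = false := by
            simp [List.isPrefixOf]; exact fun e => hc e
          simp [hp]
        rw [e1, ih rest (ch :: cur) _ hlt]
        cases hs : pvSplitCh c rest with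
        | nil => exact absurd hs (pvSplitCh_ne_nil c rest)
        | cons a t =>
          simp [pvSplitCh, hs, pvMapHead, show ch ≠ c from fun e => hc e.symm,
            List.reverse_cons, List.append_assoc]

lemma pvSplitOn_eq (c : Char) (l : List Char) :
    PySem.Chars.splitOn l [c] = pvSplitCh c l := by
  unfold PySem.Chars.splitOn
  rw [pvSplitCh_go c (l.length + 1) l [] [] (by omega)]
  cases hs : pvSplitCh c l with
  | nil => exact absurd hs (pvSplitCh_ne_nil c l)
  | cons a t => simp [pvMapHead]


lemma pvSplitCh_not_mem (c : Char) (l : List Char) :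
    ∀ p ∈ pvSplitCh c l, c ∉ p := by
  induction l with
  | nil => simp [pvSplitCh]
  | cons x r ih =>
    cases hs : pvSplitCh c r with
    | nil => exact absurd hs (pvSplitCh_ne_nil c r)
    | cons a t =>
      have hred : pvSplitCh c (x :: r) = if x = c then [] :: a :: t else (x :: a) :: t := by
        rw [pvSplitCh, hs]
      intro p hp
      rw [hred] at hp
      by_cases hx : x = c
      · rw [if_pos hx] at hp
        rcases List.mem_cons.mp hp with h1 | h2
        · simp [h1]
        · exact ih p (hs ▸ h2)
      · rw [if_neg hx] at hp
        rcases List.mem_cons.mp hp with h1 | h2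
        · subst h1
          intro hcm
          rcases List.mem_cons.mp hcm with h3 | h4
          · exact hx h3.symm
          · exact ih a (hs ▸ List.mem_cons_self ..) h4
        · exact ih p (hs ▸ List.mem_cons_of_mem _ h2)

lemma pvSplitCh_append (c : Char) (t l : List Char) (h : c ∉ t) :
    pvSplitCh c (t ++ l) = pvMapHead (t ++ ·) (pvSplitCh c l) := by
  induction t with
  | nil =>
    cases hs : pvSplitCh c l with
    | nil => exact absurd hs (pvSplitCh_ne_nil c l)
    | cons a t' => simp [pvMapHead, hs]
  | cons x t' ih =>
    have hx : x ≠ c := fun e => h (e ▸ List.mem_cons_self ..)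
    have hfree : c ∉ t' := fun hm => h (List.mem_cons_of_mem _ hm)
    rw [List.cons_append, pvSplitCh, ih hfree]
    cases hs : pvSplitCh c l with
    | nil => exact absurd hs (pvSplitCh_ne_nil c l)
    | cons a t'' => simp [pvMapHead, hx]


lemma pvSplitCh_join (c : Char) (ts : List (List Char)) (hne : ts ≠ [])
    (hfree : ∀ t ∈ ts, c ∉ t) :
    pvSplitCh c (PySem.Chars.join [c] ts) = ts := by
  induction ts with
  | nil => exact absurd rfl hne
  | cons t ts ih =>
    cases ts with
    | nil =>
      rw [PySem.Chars.join_singleton]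
      have : pvSplitCh c t = pvSplitCh c (t ++ []) := by simp
      rw [this, pvSplitCh_append c t [] (hfree t (List.mem_cons_self ..))]
      simp [pvSplitCh, pvMapHead]
    | cons q rest =>
      rw [PySem.Chars.join_cons_cons, List.append_assoc,
        pvSplitCh_append c t _ (hfree t (List.mem_cons_self ..))]
      have hz : pvSplitCh c (c :: PySem.Chars.join [c] (q :: rest))
          = [] :: pvSplitCh c (PySem.Chars.join [c] (q :: rest)) := by
        cases hs : pvSplitCh c (PySem.Chars.join [c] (q :: rest)) with
        | nil => exact absurd hs (pvSplitCh_ne_nil _ _)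
        | cons a t'' => simp [pvSplitCh, hs]
      rw [show ([c] ++ PySem.Chars.join [c] (q :: rest)) = c :: PySem.Chars.join [c] (q :: rest) from rfl, hz]
      rw [ih (by simp) (fun t' ht' => hfree t' (List.mem_cons_of_mem _ ht'))]
      simp [pvMapHead]


-- ---- string-level split/join facts ----

lemma pvArr_eq (strng : String) :
    pvArr strng = (pvSplitCh ' ' strng.toList).map String.ofList := by
  unfold pvArr
  have hsep : (" " : String).toList = [' '] := rfl
  simp [PySem.Str.split?, PySem.Chars.split?, hsep, pvSplitOn_eq]


lemma pvArr_space_free (strng : String) : ∀ x ∈ pvArr strng, ' ' ∉ x.toList := by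
  rw [pvArr_eq]
  intro x hx
  rcases List.mem_map.mp hx with ⟨p, hp, rfl⟩
  rw [String.toList_ofList]
  exact pvSplitCh_not_mem ' ' strng.toList p hp


lemma pvStrExt {s t : String} (h : s.toList = t.toList) : s = t := by
  have h2 := congrArg String.ofList h
  simpa [String.ofList_toList] using h2

lemma pvStrJoin_cons_cons (p q : String) (rest : List String) :
    PySem.Str.join " " (p :: q :: rest) = p ++ " " ++ PySem.Str.join " " (q :: rest) := by
  apply pvStrExt
  rw [PySem.Str.toList_join, List.map_cons, List.map_cons, PySem.Chars.join_cons_cons]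
  rw [String.toList_append, String.toList_append, PySem.Str.toList_join, List.map_cons]

lemma pvStrJoin_singleton (p : String) : PySem.Str.join " " [p] = p := by
  apply pvStrExt
  rw [PySem.Str.toList_join, List.map_cons, List.map_nil, PySem.Chars.join_singleton]

lemma pvSplit_join (ts : List String) (hne : ts ≠ [])
    (hfree : ∀ t ∈ ts, ' ' ∉ t.toList) :
    (PySem.Str.split? (PySem.Str.join " " ts) " ").getD [] = ts := by
  have hsep : (" " : String).toList = [' '] := rfl
  unfold PySem.Str.split? PySem.Chars.split?
  rw [hsep, if_neg (by simp)]
  simp only [Option.map_some, Option.getD_some]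
  rw [PySem.Str.toList_join, hsep, pvSplitOn_eq]
  rw [pvSplitCh_join ' ' (ts.map String.toList) (by simpa using hne)
    (by intro t ht; rcases List.mem_map.mp ht with ⟨u, hu, rfl⟩; exact hfree u hu)]
  simp [List.map_map, Function.comp_def, String.ofList_toList]

lemma pvStrJoin_append (l1 l2 : List String) (h1 : l1 ≠ []) (h2 : l2 ≠ []) :
    PySem.Str.join " " (l1 ++ l2) = PySem.Str.join " " l1 ++ " " ++ PySem.Str.join " " l2 := by
  induction l1 with
  | nil => exact absurd rfl h1
  | cons a l1' ih =>
    cases l1' with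
    | nil =>
      cases l2 with
      | nil => exact absurd rfl h2
      | cons q l2' =>
        rw [List.singleton_append, pvStrJoin_cons_cons, pvStrJoin_singleton]
    | cons b l1'' =>
      simp only [List.cons_append]
      rw [pvStrJoin_cons_cons]
      rw [show b :: (l1'' ++ l2) = (b :: l1'') ++ l2 from rfl, ih (by simp), pvStrJoin_cons_cons]
      simp [String.append_assoc]

lemma pvStrJoin_flat (ls : List (List String)) (h : ∀ l ∈ ls, l ≠ []) :
    PySem.Str.join " " (ls.map (PySem.Str.join " ")) = PySem.Str.join " " ls.flatten := by
  induction ls with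
  | nil => rfl
  | cons l ls ih =>
    cases ls with
    | nil => simp [pvStrJoin_singleton]
    | cons l2 ls2 =>
      have hl : l ≠ [] := h l (List.mem_cons_self ..)
      have hrest : ∀ x ∈ l2 :: ls2, x ≠ [] := fun x hx => h x (List.mem_cons_of_mem _ hx)
      rw [List.map_cons, List.map_cons, pvStrJoin_cons_cons, ← List.map_cons, ih hrest]
      have hfl : (l2 :: ls2).flatten ≠ [] := by
        have h2 := hrest l2 (List.mem_cons_self ..)
        cases l2 with
        | nil => exact absurd rfl h2
        | cons y ys => simp
      rw [show (l :: l2 :: ls2).flatten = l ++ (l2 :: ls2).flatten from rfl,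
        pvStrJoin_append l _ hl hfl]

lemma pvSJ_eq_join (h : String) (t : List String) :
    pvSJ h t = PySem.Str.join " " (h :: t) := by
  induction t generalizing h with
  | nil => simp [pvSJ, pvStrJoin_singleton]
  | cons x t' ih =>
    have step : pvSJ h (x :: t') = pvSJ (h ++ " " ++ x) t' := rfl
    rw [step, ih]
    cases t' with
    | nil => rw [pvStrJoin_singleton, pvStrJoin_cons_cons, pvStrJoin_singleton]
    | cons y t'' =>
      rw [pvStrJoin_cons_cons, pvStrJoin_cons_cons h, pvStrJoin_cons_cons x]
      simp [String.append_assoc]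

-- ---- A's loops ----

/-- combine an existing bucket value with the tokens of that weight. -/
def pvComb : Option String → List String → Option String
  | o, [] => o
  | some v, h :: t => some (pvSJ v (h :: t))
  | none, h :: t => some (pvSJ h t)

lemma pvEnum_map (xs : List String) : ∀ (s : Int),
    PySem.List.enumerate (xs.map pvDigitSum) s
      = (PySem.List.enumerate xs s).map (fun p => (p.1, pvDigitSum p.2)) := by
  induction xs with
  | nil => intro s; simp [PySem.List.enumerate_nil]
  | cons x xs ih =>
    intro s
    rw [List.map_cons, PySem.List.enumerate_cons, PySem.List.enumerate_cons, ih, List.map_cons]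

lemma pvEnum_get (xs : List String) : ∀ (s i : Int) (x : String),
    (i, x) ∈ PySem.List.enumerate xs s → ∃ n : Nat, i = s + n ∧ xs[n]? = some x := by
  induction xs with
  | nil => intro s i x h; simp [PySem.List.enumerate_nil] at h
  | cons y ys ih =>
    intro s i x h
    rw [PySem.List.enumerate_cons] at h
    rcases List.mem_cons.mp h with h1 | h2
    · have hi := congrArg Prod.fst h1
      have hx := congrArg Prod.snd h1
      simp only at hi hx
      exact ⟨0, by omega, by simp [hx]⟩
    · obtain ⟨n, hn, hx⟩ := ih (s + 1) i x h2
      exact ⟨n + 1, by push_cast; omega, by simpa using hx⟩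

lemma pvEnum_snd_fold {β : Type} (f : β → String → β) : ∀ (xs : List String) (s : Int) (init : β),
    (PySem.List.enumerate xs s).foldl (fun d p => f d p.2) init = xs.foldl f init := by
  intro xs
  induction xs with
  | nil => intro s init; simp [PySem.List.enumerate_nil]
  | cons y ys ih =>
    intro s init
    rw [PySem.List.enumerate_cons, List.foldl_cons, List.foldl_cons]
    exact ih (s + 1) _

lemma pvEnum_fold (strng : String) :
    (PySem.List.enumerate ((pvArr strng).map pvDigitSum)).foldl
      (fun d p =>
        if d.contains p.2 then
          d.insert p.2 (d.getD p.2 "" ++ " " ++ PySem.List.pyGetD (pvArr strng) p.1 "")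
        else
          d.insert p.2 (PySem.List.pyGetD (pvArr strng) p.1 "")) PySem.Dict.empty
    = (pvArr strng).foldl pvStep PySem.Dict.empty := by
  rw [pvEnum_map _ 0, List.foldl_map,
    show (pvArr strng).foldl pvStep PySem.Dict.empty
      = (PySem.List.enumerate (pvArr strng) 0).foldl (fun d p => pvStep d p.2) PySem.Dict.empty from
      (pvEnum_snd_fold pvStep (pvArr strng) 0 _).symm]
  apply PySem.List.foldl_congr_mem
  intro acc p hp
  obtain ⟨n, hn, hx⟩ := pvEnum_get (pvArr strng) 0 p.1 p.2 (by simpa using hp)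
  have hi : p.1 = (n : Int) := by omega
  have hg : PySem.List.pyGetD (pvArr strng) p.1 "" = p.2 := by
    rw [hi, PySem.List.pyGetD_natCast, List.getD_eq_getElem?_getD, hx]
    rfl
  simp [pvStep, hg]

lemma pvM1_get? (xs : List String) : ∀ (d : PySem.Dict Int String) (w : Int),
    (xs.foldl pvStep d).get? w = pvComb (d.get? w) (xs.filter (fun x => pvDigitSum x == w)) := by
  induction xs with
  | nil =>
    intro d w
    simp [pvComb]
  | cons x xs ih =>
    intro d w
    rw [List.foldl_cons, ih]
    by_cases hxw : pvDigitSum x = w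
    · subst hxw
      have hfil : (x :: xs).filter (fun y => pvDigitSum y == pvDigitSum x)
          = x :: xs.filter (fun y => pvDigitSum y == pvDigitSum x) := by simp
      rw [hfil]
      cases hd : d.get? (pvDigitSum x) with
      | some v =>
        have hcont : d.contains (pvDigitSum x) = true := by
          rw [PySem.Dict.contains_eq_isSome_get?, hd]; rfl
        have hstep : pvStep d x = d.insert (pvDigitSum x) (v ++ " " ++ x) := by
          unfold pvStep
          rw [if_pos hcont, PySem.Dict.getD_eq_get?_getD, hd]
          rfl
        rw [hstep, PySem.Dict.get?_insert_self]
        cases hf : xs.filter (fun y => pvDigitSum y == pvDigitSum x) with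
        | nil => simp [pvComb, pvSJ]
        | cons h t => simp [pvComb, pvSJ, List.foldl_cons]
      | none =>
        have hcont : d.contains (pvDigitSum x) = false := by
          rw [PySem.Dict.contains_eq_isSome_get?, hd]; rfl
        have hstep : pvStep d x = d.insert (pvDigitSum x) x := by
          unfold pvStep
          rw [hcont]
          simp
        rw [hstep, PySem.Dict.get?_insert_self]
        cases hf : xs.filter (fun y => pvDigitSum y == pvDigitSum x) with
        | nil => simp [pvComb, pvSJ]
        | cons h t => simp [pvComb, pvSJ, List.foldl_cons]
    · have hg : (pvStep d x).get? w = d.get? w := by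
        unfold pvStep
        split_ifs <;> rw [PySem.Dict.get?_insert_of_ne _ _ (fun e => hxw e.symm)]
      have hfil : (x :: xs).filter (fun y => pvDigitSum y == w)
          = xs.filter (fun y => pvDigitSum y == w) := by
        rw [List.filter_cons]
        simp [hxw]
      rw [hg, hfil]

lemma pvM1_keys_nodup (xs : List String) :
    (xs.foldl pvStep PySem.Dict.empty).keys.Nodup := by
  have hstep : ∀ (d : PySem.Dict Int String) (x : String), pvStep d x
      = d.insert (pvDigitSum x)
          (if d.contains (pvDigitSum x) then d.getD (pvDigitSum x) "" ++ " " ++ x else x) := by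
    intro d x
    unfold pvStep
    by_cases h : d.contains (pvDigitSum x) = true
    · rw [if_pos h, if_pos h]
    · rw [if_neg h, if_neg h]
  have he : xs.foldl pvStep PySem.Dict.empty
      = xs.foldl (fun d x => d.insert (pvDigitSum x)
          (if d.contains (pvDigitSum x) then d.getD (pvDigitSum x) "" ++ " " ++ x else x))
          PySem.Dict.empty := by
    apply PySem.List.foldl_congr_mem
    intro acc x _
    exact hstep acc x
  rw [he]
  apply PySem.Dict.nodup_keys_foldl_insert_key
  rw [show (PySem.Dict.empty : PySem.Dict Int String).keys = [] from rfl]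
  exact List.nodup_nil

lemma pvLoop2_get? (F : String → String) : ∀ (ks : List Int), ks.Nodup →
    ∀ (d : PySem.Dict Int String) (w : Int),
    (ks.foldl (fun d k => d.insert k (F (d.getD k ""))) d).get? w
      = if w ∈ ks then some (F (d.getD w "")) else d.get? w := by
  intro ks
  induction ks with
  | nil => intro hk d w; simp
  | cons k ks ih =>
    intro hk d w
    obtain ⟨hk1, hk2⟩ := List.nodup_cons.mp hk
    rw [List.foldl_cons, ih hk2]
    by_cases hw : w ∈ ks
    · have hwk : w ≠ k := fun e => hk1 (e ▸ hw)
      rw [if_pos hw, if_pos (List.mem_cons_of_mem _ hw), PySem.Dict.getD_insert_of_ne _ _ _ hwk]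
    · rw [if_neg hw]
      by_cases hwk : w = k
      · subst hwk
        rw [PySem.Dict.get?_insert_self, if_pos (List.mem_cons_self ..)]
      · rw [PySem.Dict.get?_insert_of_ne _ _ hwk, if_neg (by simp [hwk, hw])]

-- ---- the sort ----

lemma pvSorted2_eq (xs : List String) :
    PySem.List.sorted2 xs pvDigitSum (fun x => x) = PySem.List.sorted xs pvKey := by
  have hbe : (fun (a b : String) =>
        decide (pvDigitSum a < pvDigitSum b)
          || (!decide (pvDigitSum b < pvDigitSum a) && decide (a < b)))
      = fun a b => decide (pvKey a < pvKey b) := by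
    funext a b
    by_cases h1 : pvDigitSum a < pvDigitSum b
    · simp [pvKey, Prod.Lex.toLex_lt_toLex, h1]
    · by_cases h2 : pvDigitSum b < pvDigitSum a
      · have h3 : pvDigitSum a ≠ pvDigitSum b := ne_of_gt h2
        simp [pvKey, Prod.Lex.toLex_lt_toLex, h1, h2, h3]
      · have h3 : pvDigitSum a = pvDigitSum b := le_antisymm (not_lt.mp h2) (not_lt.mp h1)
        simp [pvKey, Prod.Lex.toLex_lt_toLex, h3]
  show List.foldl (fun acc x => PySem.List.insertBy (fun a b =>
        decide (pvDigitSum a < pvDigitSum b)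
          || (!decide (pvDigitSum b < pvDigitSum a) && decide (a < b))) x acc) [] xs = _
  rw [hbe]
  rfl

lemma pvTks_weight (strng : String) (w : Int) (x : String) (hx : x ∈ pvTks strng w) :
    pvDigitSum x = w := by
  unfold pvTks at hx
  rw [PySem.List.mem_sorted] at hx
  simpa using (List.mem_filter.mp hx).2

lemma pvTks_ne_nil (strng : String) (w : Int)
    (hw : w ∈ (pvArr strng).map pvDigitSum) : pvTks strng w ≠ [] := by
  obtain ⟨x, hx, hdx⟩ := List.mem_map.mp hw
  intro he
  unfold pvTks at he
  rw [PySem.List.sorted_eq_nil_iff] at he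
  have hmem : x ∈ (pvArr strng).filter (fun y => pvDigitSum y == w) :=
    List.mem_filter.mpr ⟨hx, by simp [hdx]⟩
  rw [he] at hmem
  cases hmem

lemma pvCover_perm : ∀ (ws : List Int), ws.Nodup → ∀ (xs : List String),
    (∀ x ∈ xs, pvDigitSum x ∈ ws) →
    (ws.flatMap (fun w => xs.filter (fun x => pvDigitSum x == w))).Perm xs := by
  intro ws
  induction ws with
  | nil =>
    intro _ xs hc
    have hx : xs = [] := List.eq_nil_iff_forall_not_mem.mpr (fun a ha => by simpa using hc a ha)
    simp [hx]
  | cons w ws ih =>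
    intro hnd xs hc
    obtain ⟨hw, hnd'⟩ := List.nodup_cons.mp hnd
    rw [List.flatMap_cons]
    have hrw : ∀ w' ∈ ws, xs.filter (fun x => pvDigitSum x == w')
        = (xs.filter (fun x => !(pvDigitSum x == w))).filter (fun x => pvDigitSum x == w') := by
      intro w' hw'
      rw [List.filter_filter]
      apply List.filter_congr
      intro x _
      have hne : w' ≠ w := fun e => hw (e ▸ hw')
      by_cases h : pvDigitSum x = w'
      · simp [h, hne]
      · simp [h]
    have h2 : ws.flatMap (fun w' => xs.filter (fun x => pvDigitSum x == w'))
        = ws.flatMap (fun w' =>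
            (xs.filter (fun x => !(pvDigitSum x == w))).filter (fun x => pvDigitSum x == w')) := by
      rw [List.flatMap_def, List.flatMap_def, List.map_congr_left hrw]
    rw [h2]
    have hcov : ∀ x ∈ xs.filter (fun x => !(pvDigitSum x == w)), pvDigitSum x ∈ ws := by
      intro x hx
      obtain ⟨hx1, hx2⟩ := List.mem_filter.mp hx
      rcases List.mem_cons.mp (hc x hx1) with h | h
      · simp [h] at hx2
      · exact h
    exact List.Perm.trans (List.Perm.append_left _ (ih hnd' _ hcov))
      (List.filter_append_perm _ xs)

lemma pvBuckets_perm (strng : String) (ws : List Int) (hnd : ws.Nodup)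
    (hc : ∀ x ∈ pvArr strng, pvDigitSum x ∈ ws) :
    (ws.flatMap (pvTks strng)).Perm (pvArr strng) := by
  have h1 : ∀ (ws' : List Int), (ws'.flatMap (pvTks strng)).Perm
      (ws'.flatMap (fun w => (pvArr strng).filter (fun x => pvDigitSum x == w))) := by
    intro ws'
    induction ws' with
    | nil => simp
    | cons w ws' ih =>
      rw [List.flatMap_cons, List.flatMap_cons]
      exact List.Perm.append (PySem.List.sorted_perm _ _ _) ih
  exact (h1 ws).trans (pvCover_perm ws hnd _ hc)

lemma pvBuckets_pairwise (strng : String) : ∀ (ws : List Int), ws.Pairwise (· < ·) →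
    List.Pairwise (fun a b => pvKey a ≤ pvKey b) (ws.flatMap (pvTks strng)) := by
  intro ws hp
  induction ws with
  | nil => simp
  | cons w ws ih =>
    obtain ⟨hw, hp'⟩ := List.pairwise_cons.mp hp
    rw [List.flatMap_cons, List.pairwise_append]
    refine ⟨?_, ih hp', ?_⟩
    · have hs := PySem.List.sorted_pairwise
        ((pvArr strng).filter (fun x => pvDigitSum x == w)) (fun x => x)
      refine List.Pairwise.imp_of_mem (fun {a b} ha hb hab => ?_) hs
      have hda : pvDigitSum a = w := pvTks_weight strng w a ha
      have hdb : pvDigitSum b = w := pvTks_weight strng w b hb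
      show pvKey a ≤ pvKey b
      unfold pvKey
      exact Prod.Lex.toLex_le_toLex.mpr (Or.inr ⟨hda.trans hdb.symm, hab⟩)
    · intro a ha b hb
      obtain ⟨w', hw', hbw'⟩ := List.mem_flatMap.mp hb
      have hda : pvDigitSum a = w := pvTks_weight strng w a ha
      have hdb : pvDigitSum b = w' := pvTks_weight strng w' b hbw'
      have hlt : pvDigitSum a < pvDigitSum b := by
        rw [hda, hdb]
        exact hw w' hw'
      show pvKey a ≤ pvKey b
      unfold pvKey
      exact le_of_lt (Prod.Lex.toLex_lt_toLex.mpr (Or.inl hlt))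

lemma pvMain_sort (strng : String) :
    PySem.List.sorted (pvArr strng) pvKey
      = (PySem.List.sorted (PySem.Set.ofList ((pvArr strng).map pvDigitSum)) (fun x => x)).flatMap
          (pvTks strng) := by
  have hinj : Function.Injective pvKey := by
    intro a b h
    have h2 := congrArg (fun z => (ofLex z).2) h
    simpa [pvKey] using h2
  have hnd : (PySem.List.sorted (PySem.Set.ofList ((pvArr strng).map pvDigitSum))
      (fun x => x)).Nodup :=
    ((PySem.List.sorted_perm _ _ _).symm).nodup (PySem.Set.nodup_ofList _)
  have hcov : ∀ x ∈ pvArr strng, pvDigitSum x ∈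
      PySem.List.sorted (PySem.Set.ofList ((pvArr strng).map pvDigitSum)) (fun x => x) := by
    intro x hx
    rw [PySem.List.mem_sorted, PySem.Set.mem_ofList]
    exact List.mem_map_of_mem hx
  apply PySem.List.eq_of_perm_of_pairwise_le_of_injective pvKey hinj
  · exact (PySem.List.sorted_perm _ _ _).trans (pvBuckets_perm strng _ hnd hcov).symm
  · exact PySem.List.sorted_pairwise _ _
  · exact pvBuckets_pairwise strng _ (PySem.List.sorted_ofList_pairwise_lt _)

-- ---- assembly ----

lemma pvA_eq (strng : String) :
    order_weight strng
      = PySem.Str.join " "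
          ((PySem.List.sorted (PySem.Set.ofList ((pvArr strng).map pvDigitSum)) (fun x => x)).map
            (fun w => PySem.Str.join " " (pvTks strng w))) := by
  simp only [order_weight]
  rw [show ((PySem.Str.split? strng " ").getD []) = pvArr strng from rfl]
  rw [pvEnum_fold strng]
  have hset : ((pvArr strng).map pvDigitSum).foldl (fun s item => PySem.Set.add s item)
      PySem.Set.empty = PySem.Set.ofList ((pvArr strng).map pvDigitSum) := by
    rw [← PySem.Set.update_nil_left]
    rfl
  rw [hset]
  apply congrArg
  apply List.map_congr_left
  intro w hw
  have hww : w ∈ (pvArr strng).map pvDigitSum := by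
    rw [PySem.List.mem_sorted, PySem.Set.mem_ofList] at hw
    exact hw
  obtain ⟨x, hx, hdx⟩ := List.mem_map.mp hww
  cases hfl : (pvArr strng).filter (fun y => pvDigitSum y == w) with
  | nil =>
    have hmem : x ∈ (pvArr strng).filter (fun y => pvDigitSum y == w) :=
      List.mem_filter.mpr ⟨hx, by simp [hdx]⟩
    rw [hfl] at hmem
    cases hmem
  | cons h0 t0 =>
    have hm1w : ((pvArr strng).foldl pvStep PySem.Dict.empty).get? w = some (pvSJ h0 t0) := by
      rw [pvM1_get?, PySem.Dict.get?_empty, hfl]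
      simp [pvComb]
    have hmem : w ∈ ((pvArr strng).foldl pvStep PySem.Dict.empty).keys := by
      by_contra hmem
      have h2 := (PySem.Dict.get?_eq_none_iff_not_mem_keys _ w).mpr hmem
      rw [hm1w] at h2
      cases h2
    have hloop := pvLoop2_get? (fun v => PySem.Str.join " "
        (PySem.List.sorted ((PySem.Str.split? v " ").getD []) (fun x => x)))
        ((pvArr strng).foldl pvStep PySem.Dict.empty).keys (pvM1_keys_nodup (pvArr strng))
        ((pvArr strng).foldl pvStep PySem.Dict.empty) w
    simp only at hloop
    rw [PySem.Dict.getD_eq_get?_getD, hloop, if_pos hmem, Option.getD_some]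
    have hgd : ((pvArr strng).foldl pvStep PySem.Dict.empty).getD w "" = pvSJ h0 t0 := by
      rw [PySem.Dict.getD_eq_get?_getD, hm1w]
      rfl
    rw [hgd, pvSJ_eq_join]
    have hfree : ∀ t ∈ h0 :: t0, ' ' ∉ t.toList := by
      intro t ht
      rw [← hfl] at ht
      exact pvArr_space_free strng t (List.mem_filter.mp ht).1
    rw [pvSplit_join (h0 :: t0) (by simp) hfree]
    unfold pvTks
    rw [← hfl]

lemma pvB_eq (strng : String) :
    order_weight_alt strng = PySem.Str.join " " (PySem.List.sorted (pvArr strng) pvKey) := by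
  unfold order_weight_alt
  rw [show ((PySem.Str.split? strng " ").getD []) = pvArr strng from rfl]
  rw [pvSorted2_eq]

-- ===== VERDICT (by name: the statement is the Claim_ definition above) =====
theorem order_weight_spec : Claim_equal_order_weight := by
  intro strng _ _
  show order_weight strng = order_weight_alt strng
  rw [pvA_eq, pvB_eq, pvMain_sort]
  have hmap : (PySem.List.sorted (PySem.Set.ofList ((pvArr strng).map pvDigitSum))
        (fun x => x)).map (fun w => PySem.Str.join " " (pvTks strng w))
      = ((PySem.List.sorted (PySem.Set.ofList ((pvArr strng).map pvDigitSum))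
        (fun x => x)).map (pvTks strng)).map (PySem.Str.join " ") := by
    rw [List.map_map]
    rfl
  rw [hmap]
  have hne : ∀ l ∈ (PySem.List.sorted (PySem.Set.ofList ((pvArr strng).map pvDigitSum))
      (fun x => x)).map (pvTks strng), l ≠ [] := by
    intro l hl
    obtain ⟨w, hwS, rfl⟩ := List.mem_map.mp hl
    have hww : w ∈ (pvArr strng).map pvDigitSum := by
      rw [PySem.List.mem_sorted, PySem.Set.mem_ofList] at hwS
      exact hwS
    exact pvTks_ne_nil strng w hww
  rw [pvStrJoin_flat _ hne, ← List.flatMap_def]
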